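-- pv_equiv track=rewrite | github.com/toopeachok/diploma-draft | new_main_2.py | get_segments_list
-- ===== SOURCE A (Python) =====
-- def get_segments_list(bitmap):
--     segments_list = []
--
--     i = 0
--     while i < len(bitmap):
--         j = 0
--         while j < len(bitmap):
--             if bitmap[i][j] == 1:
--                 start = j
--
--                 k = j + 1
--                 while (k < len(bitmap)) and (bitmap[i][k] == 1):
--                     k += 1
--
--                 stop = k - 1
--                 segments_list.append((i, start, stop))
--
--                 j = k + 1
--             else:
--                 j += 1
--
--         i += 1
--
--     return segments_list
-- ===== SOURCE B (Python) =====
-- def get_segments_list(bitmap):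
--     segments_list = []
--     n = len(bitmap)
--     for i in range(n):
--         start = None
--         for j in range(n):
--             if bitmap[i][j] == 1:
--                 if start is None:
--                     start = j
--             else:
--                 if start is not None:
--                     segments_list.append((i, start, j - 1))
--                     start = None
--         if start is not None:
--             segments_list.append((i, start, n - 1))
--     return segments_list
-- ===== Notes on version B (the rewrite author's own statement) =====
-- stated objective: simpler
-- what changed: Replaces the inner scan-ahead while-loop (with manual j = k + 1 jumps) by a flat single-pass state machine per row that tracks an optional run-start and flushes the open run after the column loop.
import Mathlib
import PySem

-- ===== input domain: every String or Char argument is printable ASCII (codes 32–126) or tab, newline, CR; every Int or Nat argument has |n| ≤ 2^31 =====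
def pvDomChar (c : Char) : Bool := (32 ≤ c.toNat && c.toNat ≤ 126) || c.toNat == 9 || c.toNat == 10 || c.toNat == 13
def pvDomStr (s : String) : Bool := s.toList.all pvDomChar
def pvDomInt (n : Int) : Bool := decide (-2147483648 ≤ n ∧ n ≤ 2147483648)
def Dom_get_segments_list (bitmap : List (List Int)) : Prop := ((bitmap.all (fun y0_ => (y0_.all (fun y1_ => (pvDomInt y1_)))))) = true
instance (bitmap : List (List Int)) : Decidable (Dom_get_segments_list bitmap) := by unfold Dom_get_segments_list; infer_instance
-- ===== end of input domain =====

-- B replaces A's inner scan-ahead loop by a flat per-row state machine carrying an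
-- optional run-start (objective: simpler). Pre_ excludes ragged bitmaps on which the
-- Python raises IndexError (both programs index bitmap[i][j] for j < len(bitmap)).

-- ===== PORT A =====
-- bitmap[i][j]; under Pre_ every access is in range, so the default 0 is never read
def pvCell (bitmap : List (List Int)) (i j : Nat) : Int :=
  (bitmap.getD i []).getD j 0

-- inner while: k advances while k < n and bitmap[i][k] == 1
def aRun (bitmap : List (List Int)) (n i k : Nat) : Nat :=
  if k < n ∧ pvCell bitmap i k = 1 then aRun bitmap n i (k+1) else k
termination_by n - k

theorem aRun_ge (bitmap : List (List Int)) (n i k : Nat) : k ≤ aRun bitmap n i k := by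
  unfold aRun
  split
  · exact le_trans (Nat.le_succ k) (aRun_ge bitmap n i (k+1))
  · exact le_refl k
termination_by n - k
decreasing_by omega

-- middle while over j
def aCols (bitmap : List (List Int)) (n i j : Nat) : List (Int × Int × Int) :=
  if j < n then
    if pvCell bitmap i j = 1 then
      let k := aRun bitmap n i (j+1)
      ((i : Int), (j : Int), (k : Int) - 1) :: aCols bitmap n i (k+1)
    else
      aCols bitmap n i (j+1)
  else []
termination_by n - j
decreasing_by
  · have := aRun_ge bitmap n i (j+1); omega
  · omega

-- outer while over i
def aRows (bitmap : List (List Int)) (n i : Nat) : List (Int × Int × Int) :=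
  if i < n then aCols bitmap n i 0 ++ aRows bitmap n (i+1) else []
termination_by n - i

def get_segments_list (bitmap : List (List Int)) : List (Int × Int × Int) :=
  aRows bitmap bitmap.length 0

-- ===== PORT B =====
-- per-row state machine: st = none (no open run) / some s (run open since column s)
def bCols (bitmap : List (List Int)) (n i j : Nat) (st : Option Nat) :
    List (Int × Int × Int) :=
  if j < n then
    if pvCell bitmap i j = 1 then
      bCols bitmap n i (j+1) (some (st.getD j))
    else
      match st with
      | some s => ((i : Int), (s : Int), (j : Int) - 1) :: bCols bitmap n i (j+1) none
      | none => bCols bitmap n i (j+1) none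
  else
    match st with
    | some s => [((i : Int), (s : Int), (n : Int) - 1)]
    | none => []
termination_by n - j

def bRows (bitmap : List (List Int)) (n i : Nat) : List (Int × Int × Int) :=
  if i < n then bCols bitmap n i 0 none ++ bRows bitmap n (i+1) else []
termination_by n - i

def get_segments_list_alt (bitmap : List (List Int)) : List (Int × Int × Int) :=
  bRows bitmap bitmap.length 0

-- ===== PRECONDITION & SPEC =====
-- Pre_ excludes exactly the ragged bitmaps (some row shorter than len(bitmap)) on
-- which Python A raises IndexError.
def Pre_get_segments_list (bitmap : List (List Int)) : Prop :=
  ∀ row ∈ bitmap, bitmap.length ≤ row.length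

instance (bitmap : List (List Int)) : Decidable (Pre_get_segments_list bitmap) := by
  unfold Pre_get_segments_list; infer_instance

def pvWitness_get_segments_list : List (List Int) := [[1, 0, 1], [0, 1, 1], [1, 1, 1]]

def Spec_get_segments_list (bitmap : List (List Int)) (out : List (Int × Int × Int)) : Prop := out = get_segments_list_alt bitmap
instance (bitmap : List (List Int)) (out : List (Int × Int × Int)) : Decidable (Spec_get_segments_list bitmap out) := by unfold Spec_get_segments_list; infer_instance

-- ===== CLAIM (what is proved, stated in full; the proofs are below) =====
def Claim_equal_get_segments_list : Prop := ∀ (bitmap : List (List Int)), Dom_get_segments_list bitmap → Pre_get_segments_list bitmap → Spec_get_segments_list bitmap (get_segments_list bitmap)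

-- ===== LEMMAS AND PROOFS =====

-- combined inner invariant: with an open run (start s, j ≤ n) B emits the run ending
-- at aRun's stop and then behaves like A's scan resumed past it; with no open run
-- B's scan equals A's scan
theorem bCols_eq (bitmap : List (List Int)) (n i : Nat) :
    ∀ j, (∀ s, j ≤ n →
      bCols bitmap n i j (some s)
        = ((i : Int), (s : Int), ((aRun bitmap n i j : Int) - 1))
            :: aCols bitmap n i (aRun bitmap n i j + 1))
      ∧ bCols bitmap n i j none = aCols bitmap n i j := by
  intro j
  by_cases hlt : j < n
  · by_cases h1 : pvCell bitmap i j = 1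
    · constructor
      · intro s _
        rw [bCols, if_pos hlt, if_pos h1]
        rw [show aRun bitmap n i j = aRun bitmap n i (j+1) by
          rw [aRun, if_pos ⟨hlt, h1⟩]]
        exact (bCols_eq bitmap n i (j+1)).1 s hlt
      · rw [bCols, if_pos hlt, if_pos h1, aCols, if_pos hlt, if_pos h1]
        simp only [Option.getD]
        exact (bCols_eq bitmap n i (j+1)).1 j hlt
    · constructor
      · intro s _
        rw [bCols, if_pos hlt, if_neg h1]
        rw [show aRun bitmap n i j = j by rw [aRun, if_neg (by tauto)]]
        rw [(bCols_eq bitmap n i (j+1)).2]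
      · rw [bCols, if_pos hlt, if_neg h1, aCols, if_pos hlt, if_neg h1]
        exact (bCols_eq bitmap n i (j+1)).2
  · constructor
    · intro s hj
      have hjn : j = n := le_antisymm hj (Nat.le_of_not_lt hlt)
      rw [bCols, if_neg hlt]
      rw [show aRun bitmap n i j = j by rw [aRun, if_neg (by omega)]]
      rw [show aCols bitmap n i (j+1) = [] by rw [aCols, if_neg (by omega)]]
      simp [hjn]
    · rw [bCols, if_neg hlt, aCols, if_neg hlt]
termination_by j => n - j

theorem bRows_eq (bitmap : List (List Int)) (n : Nat) :
    ∀ i, bRows bitmap n i = aRows bitmap n i := by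
  intro i
  by_cases h : i < n
  · rw [bRows, if_pos h, aRows, if_pos h, (bCols_eq bitmap n i 0).2, bRows_eq bitmap n (i+1)]
  · rw [bRows, if_neg h, aRows, if_neg h]
termination_by i => n - i

-- ===== VERDICT (by name: the statement is the Claim_ definition above) =====
theorem get_segments_list_spec : Claim_equal_get_segments_list := by
  intro bitmap _ _
  unfold Spec_get_segments_list get_segments_list get_segments_list_alt
  exact (bRows_eq bitmap bitmap.length 0).symm
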